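-- pv_equiv track=rewrite | github.com/good5229/python-practice | 1003.py | count_fibonacci
-- ===== SOURCE A (Python) =====
-- def count_fibonacci(n):
--     zero_count = [1, 0]
--     one_count = [0, 1]
--     if n <= 1:
--         return
--
--     for i in range(2, n + 1):
--         zero_count.append(zero_count[i - 1] + zero_count[i - 2])
--         one_count.append(one_count[i - 1] + one_count[i - 2])
--
--     return zero_count, one_count
-- ===== SOURCE B (Python) =====
-- def count_fibonacci(n):
--     if n <= 1:
--         return
--     one_count = [0, 1]
--     for _ in range(2, n + 1):
--         one_count.append(one_count[-1] + one_count[-2])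
--     zero_count = [1] + one_count[:-1]
--     return zero_count, one_count
-- ===== Notes on version B (the rewrite author's own statement) =====
-- stated objective: simpler
-- what changed: B runs only ONE Fibonacci recurrence (for one_count) and derives zero_count without any recurrence as the shifted copy [1] + one_count[:-1], exploiting that the zero counts are the same sequence offset by one; A maintains two parallel index-driven recurrences.
import Mathlib
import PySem

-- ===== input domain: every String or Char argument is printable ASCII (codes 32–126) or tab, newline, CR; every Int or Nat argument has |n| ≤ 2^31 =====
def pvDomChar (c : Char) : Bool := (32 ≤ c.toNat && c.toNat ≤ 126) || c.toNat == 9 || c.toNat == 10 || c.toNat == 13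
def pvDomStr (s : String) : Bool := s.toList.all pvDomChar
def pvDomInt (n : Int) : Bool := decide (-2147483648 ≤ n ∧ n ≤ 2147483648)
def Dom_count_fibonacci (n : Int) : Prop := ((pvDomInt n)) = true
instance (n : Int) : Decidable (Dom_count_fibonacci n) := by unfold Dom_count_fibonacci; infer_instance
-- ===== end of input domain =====

-- B runs only one Fibonacci recurrence (one_count) and derives zero_count as the
-- shifted copy [1] + one_count[:-1] instead of A's second parallel recurrence
-- (objective: simpler; same asymptotic cost).


-- ===== PORT A =====
-- loop body: append zero_count[i-1]+zero_count[i-2] and one_count[i-1]+one_count[i-2]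
-- (indices are always in range in A; the .getD 0 only totalises pyGet?)
def pvStepA (p : List Int × List Int) (i : Int) : List Int × List Int :=
  (p.1 ++ [(PySem.List.pyGet? p.1 (i - 1)).getD 0 + (PySem.List.pyGet? p.1 (i - 2)).getD 0],
   p.2 ++ [(PySem.List.pyGet? p.2 (i - 1)).getD 0 + (PySem.List.pyGet? p.2 (i - 2)).getD 0])

def count_fibonacci (n : Int) : Option (List Int × List Int) :=
  let zero_count : List Int := [1, 0]
  let one_count : List Int := [0, 1]
  if n ≤ 1 then none
  else
    let p := (PySem.List.pyRange 2 (n + 1) 1).foldl pvStepA (zero_count, one_count)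
    some (p.1, p.2)

-- ===== PORT B =====
-- loop body: append one_count[-1] + one_count[-2]
def pvStepB (one_count : List Int) (_ : Int) : List Int :=
  one_count ++ [(PySem.List.pyGet? one_count (-1)).getD 0 + (PySem.List.pyGet? one_count (-2)).getD 0]

def count_fibonacci_alt (n : Int) : Option (List Int × List Int) :=
  if n ≤ 1 then none
  else
    let one_count := (PySem.List.pyRange 2 (n + 1) 1).foldl pvStepB [0, 1]
    let zero_count := [1] ++ PySem.List.slice one_count none (some (-1))  -- [1] + one_count[:-1]
    some (zero_count, one_count)

-- ===== PRECONDITION & SPEC =====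
def Spec_count_fibonacci (n : Int) (out : Option (List Int × List Int)) : Prop := out = count_fibonacci_alt n
instance (n : Int) (out : Option (List Int × List Int)) : Decidable (Spec_count_fibonacci n out) := by unfold Spec_count_fibonacci; infer_instance

-- ===== CLAIM =====
def Claim_equal_count_fibonacci : Prop := ∀ (n : Int), Dom_count_fibonacci n → Spec_count_fibonacci n (count_fibonacci n)

-- ===== LEMMAS AND PROOFS =====

-- the pure pairs: (one_count[k], one_count[k+1]) resp. (zero_count[k], zero_count[k+1])
def pvFibP : Nat → Int × Int
  | 0 => (0, 1)
  | k + 1 => ((pvFibP k).2, (pvFibP k).1 + (pvFibP k).2)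

def pvZFibP : Nat → Int × Int
  | 0 => (1, 0)
  | k + 1 => ((pvZFibP k).2, (pvZFibP k).1 + (pvZFibP k).2)

def pvFibL : Nat → List Int
  | 0 => [0, 1]
  | k + 1 => pvFibL k ++ [(pvFibP k).1 + (pvFibP k).2]

def pvZFibL : Nat → List Int
  | 0 => [1, 0]
  | k + 1 => pvZFibL k ++ [(pvZFibP k).1 + (pvZFibP k).2]

lemma pvFibL_shape : ∀ k, ∃ l : List Int, pvFibL k = l ++ [(pvFibP k).1, (pvFibP k).2] ∧ l.length = k := by
  intro k
  induction k with
  | zero => exact ⟨[], by simp [pvFibL, pvFibP]⟩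
  | succ k ih =>
    obtain ⟨l, hl, hlen⟩ := ih
    exact ⟨l ++ [(pvFibP k).1], by simp [pvFibL, pvFibP, hl, hlen]⟩

lemma pvZFibL_shape : ∀ k, ∃ l : List Int, pvZFibL k = l ++ [(pvZFibP k).1, (pvZFibP k).2] ∧ l.length = k := by
  intro k
  induction k with
  | zero => exact ⟨[], by simp [pvZFibL, pvZFibP]⟩
  | succ k ih =>
    obtain ⟨l, hl, hlen⟩ := ih
    exact ⟨l ++ [(pvZFibP k).1], by simp [pvZFibL, pvZFibP, hl, hlen]⟩

-- the shifted-pair identity behind B's slice trick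
lemma pvZFibP_succ : ∀ k, pvZFibP (k + 1) = pvFibP k := by
  intro k
  induction k with
  | zero => simp [pvZFibP, pvFibP]
  | succ k ih =>
    have h1 : pvZFibP (k + 1 + 1) = ((pvZFibP (k + 1)).2, (pvZFibP (k + 1)).1 + (pvZFibP (k + 1)).2) := rfl
    have h2 : pvFibP (k + 1) = ((pvFibP k).2, (pvFibP k).1 + (pvFibP k).2) := rfl
    rw [h1, ih, h2]

-- zero_count is [1] followed by one_count without its last element
lemma pvZFibL_eq_shift : ∀ k, pvZFibL k = 1 :: (pvFibL k).dropLast := by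
  intro k
  induction k with
  | zero => simp [pvZFibL, pvFibL]
  | succ k ih =>
    obtain ⟨l, hl, _⟩ := pvFibL_shape k
    have hnew : (pvZFibP k).1 + (pvZFibP k).2 = (pvFibP k).2 := by
      have := congrArg Prod.snd (pvZFibP_succ k)
      simpa [pvZFibP] using this
    simp [pvZFibL, pvFibL, ih, hl, hnew]

-- B's loop state after k iterations
lemma pvStepB_fib (k : Nat) (i : Int) : pvStepB (pvFibL k) i = pvFibL (k + 1) := by
  obtain ⟨l, hl, hlen⟩ := pvFibL_shape k
  have hL : (pvFibL k).length = k + 2 := by simp [hl]; omega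
  have h1 : PySem.List.pyGet? (pvFibL k) (-1) = some (pvFibP k).2 := by
    rw [PySem.List.pyGet?_neg_one, hl]
    simp
  have h2 : PySem.List.pyGet? (pvFibL k) (-2) = some (pvFibP k).1 := by
    rw [PySem.List.pyGet?_neg_ofNat _ 2 (by omega) (by omega)]
    rw [hL, hl, List.getElem?_append_right (by omega)]
    simp [hlen]
  simp [pvStepB, h1, h2, pvFibL, Int.add_comm]

lemma pvFoldB : ∀ (k : Nat), (PySem.List.pyRange 2 ((k : Int) + 2) 1).foldl pvStepB [0, 1] = pvFibL k := by
  intro k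
  induction k with
  | zero => simp [PySem.List.pyRange_one_eq_nil, pvFibL]
  | succ k ih =>
    rw [show ((k + 1 : Nat) : Int) + 2 = ((k : Int) + 2) + 1 from by push_cast; ring,
        PySem.List.pyRange_one_succ_right (by omega)]
    rw [List.foldl_append, ih]
    simpa using pvStepB_fib k ((k : Int) + 2)

-- A's loop state after k iterations (index i = k + 2)
lemma pvStepA_fib (k : Nat) : pvStepA (pvZFibL k, pvFibL k) ((k : Int) + 2) = (pvZFibL (k + 1), pvFibL (k + 1)) := by
  obtain ⟨l, hl, hlen⟩ := pvFibL_shape k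
  obtain ⟨m, hm, hmlen⟩ := pvZFibL_shape k
  have e1 : (k : Int) + 2 - 1 = ((k + 1 : Nat) : Int) := by push_cast; ring
  have h1 : PySem.List.pyGet? (pvFibL k) ((k : Int) + 2 - 1) = some (pvFibP k).2 := by
    rw [e1, PySem.List.pyGet?_natCast, hl, List.getElem?_append_right (by omega)]
    simp [hlen]
  have h2 : (pvFibL k)[k]? = some (pvFibP k).1 := by
    rw [hl, List.getElem?_append_right (by omega)]
    simp [hlen]
  have g1 : PySem.List.pyGet? (pvZFibL k) ((k : Int) + 2 - 1) = some (pvZFibP k).2 := by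
    rw [e1, PySem.List.pyGet?_natCast, hm, List.getElem?_append_right (by omega)]
    simp [hmlen]
  have g2 : (pvZFibL k)[k]? = some (pvZFibP k).1 := by
    rw [hm, List.getElem?_append_right (by omega)]
    simp [hmlen]
  simp [pvStepA, h1, h2, g1, g2, pvFibL, pvZFibL, Int.add_comm]

lemma pvFoldA : ∀ (k : Nat), (PySem.List.pyRange 2 ((k : Int) + 2) 1).foldl pvStepA ([1, 0], [0, 1]) = (pvZFibL k, pvFibL k) := by
  intro k
  induction k with
  | zero => simp [PySem.List.pyRange_one_eq_nil, pvZFibL, pvFibL]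
  | succ k ih =>
    rw [show ((k + 1 : Nat) : Int) + 2 = ((k : Int) + 2) + 1 from by push_cast; ring,
        PySem.List.pyRange_one_succ_right (by omega)]
    rw [List.foldl_append, ih]
    simpa using pvStepA_fib k

-- ===== VERDICT =====
theorem count_fibonacci_spec : Claim_equal_count_fibonacci := by
  intro n _
  unfold Spec_count_fibonacci count_fibonacci count_fibonacci_alt
  by_cases h : n ≤ 1
  · simp [h]
  · simp only [h, if_false]
    set k : Nat := (n - 1).toNat with hk
    have hA : n + 1 = (k : Int) + 2 := by omega
    rw [hA, pvFoldA k, pvFoldB k, PySem.List.slice_to_neg_one]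
    rw [pvZFibL_eq_shift k]
    simp
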